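-- pv_equiv track=rewrite | github.com/Klimentbehr/Sketch-To-Mesh | Algorithms/Cords_To_EdgeList.py | map_coordinates_to_indices
-- ===== SOURCE A (Python) =====
-- def map_coordinates_to_indices(user_sequence):
--     point_index = {}  # This dictionary will map points to integers
--     index = 0
--     indexed_pairs = []
--
--     for pair in user_sequence:
--         # Unpack the pair for clarity
--         start, end = pair
--
--         # Check if the start coordinate is new, if so, add to the point_index
--         if start not in point_index:
--             point_index[start] = index
--             index += 1
--
--         # Check if the end coordinate is new, if so, add to the point_index
--         if end not in point_index:
--             point_index[end] = index
--             index += 1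
--
--         # Append the index pair to the output list
--         indexed_pairs.append((point_index[start], point_index[end]))
--
--     return indexed_pairs
-- ===== SOURCE B (Python) =====
-- def map_coordinates_to_indices(user_sequence):
--     pairs = [(start, end) for start, end in user_sequence]
--     flat = [point for pair in pairs for point in pair]
--
--     def first_seen_rank(point):
--         # index of a point = number of distinct points seen up to and
--         # including its first occurrence in the flattened stream, minus one
--         return len(set(flat[: flat.index(point) + 1])) - 1
--
--     return [(first_seen_rank(start), first_seen_rank(end)) for start, end in pairs]
-- ===== Notes on version B (the rewrite author's own statement) =====
-- stated objective: alternative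
-- what changed: B keeps no index table at all: it flattens the pairs into one point stream and computes each point's index as len(set(flat[:flat.index(point)+1]))-1, i.e. the number of distinct points up to that point's first occurrence, instead of A's incrementally grown dict with a running counter.
import Mathlib
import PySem

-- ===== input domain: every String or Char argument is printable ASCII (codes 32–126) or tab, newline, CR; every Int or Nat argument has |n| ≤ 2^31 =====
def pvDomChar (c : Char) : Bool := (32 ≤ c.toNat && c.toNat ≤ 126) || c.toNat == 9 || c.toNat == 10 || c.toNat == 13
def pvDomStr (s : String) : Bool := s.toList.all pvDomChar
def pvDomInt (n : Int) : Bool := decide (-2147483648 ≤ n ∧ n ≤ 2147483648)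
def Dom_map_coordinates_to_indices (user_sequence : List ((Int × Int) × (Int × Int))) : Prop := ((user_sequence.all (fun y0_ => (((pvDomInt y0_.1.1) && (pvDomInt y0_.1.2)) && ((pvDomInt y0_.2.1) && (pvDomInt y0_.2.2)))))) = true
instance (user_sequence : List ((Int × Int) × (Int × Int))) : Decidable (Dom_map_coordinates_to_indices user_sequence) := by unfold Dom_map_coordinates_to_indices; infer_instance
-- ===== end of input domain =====

-- B drops A's incremental dict+counter and instead computes each point's index as the number
-- of distinct points up to that point's first occurrence in the flattened stream; alternative
-- decomposition of the same result, proved equal.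

-- ===== PORT A =====
-- point_index[start]/point_index[end] are always present when read (just inserted if new), so
-- the KeyError branch is unreachable; ported as getD with default 0.
def goA (d : PySem.Dict (Int × Int) Int) (idx : Int) :
    List ((Int × Int) × (Int × Int)) → List (Int × Int)
  | [] => []
  | pair :: rest =>
    let start := pair.1
    let «end» := pair.2
    let s1 := if d.contains start = false then (d.insert start idx, idx + 1) else (d, idx)
    let s2 := if s1.1.contains «end» = false then (s1.1.insert «end» s1.2, s1.2 + 1) else s1
    (s2.1.getD start 0, s2.1.getD «end» 0) :: goA s2.1 s2.2 rest

def map_coordinates_to_indices (user_sequence : List ((Int × Int) × (Int × Int))) : List (Int × Int) :=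
  goA PySem.Dict.empty 0 user_sequence

-- ===== PORT B =====
-- flat.index(point) always succeeds (every queried point occurs in flat), so the ValueError
-- branch is unreachable; ported with default 0.
def first_seen_rank (flat : List (Int × Int)) (point : Int × Int) : Int :=
  match PySem.List.index? flat point with
  | some i =>
      ((PySem.Set.ofList (PySem.List.slice flat none (some ((i : Int) + 1)))).length : Int) - 1
  | none => 0

def map_coordinates_to_indices_alt (user_sequence : List ((Int × Int) × (Int × Int))) : List (Int × Int) :=
  let pairs := user_sequence.map (fun p => (p.1, p.2))
  let flat := pairs.flatMap (fun p => [p.1, p.2])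
  pairs.map (fun p => (first_seen_rank flat p.1, first_seen_rank flat p.2))

-- ===== PRECONDITION & SPEC =====
def Spec_map_coordinates_to_indices (user_sequence : List ((Int × Int) × (Int × Int))) (out : List (Int × Int)) : Prop := out = map_coordinates_to_indices_alt user_sequence
instance (user_sequence : List ((Int × Int) × (Int × Int))) (out : List (Int × Int)) : Decidable (Spec_map_coordinates_to_indices user_sequence out) := by unfold Spec_map_coordinates_to_indices; infer_instance

-- ===== CLAIM (what is proved, stated in full; the proofs are below) =====
def Claim_equal_map_coordinates_to_indices : Prop := ∀ (user_sequence : List ((Int × Int) × (Int × Int))), Dom_map_coordinates_to_indices user_sequence → Spec_map_coordinates_to_indices user_sequence (map_coordinates_to_indices user_sequence)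

-- ===== LEMMAS AND PROOFS =====

-- distinct points of F in first-occurrence order
def distincts (F : List (Int × Int)) : List (Int × Int) := PySem.Set.ofList F

-- the flattened point stream of a pair list
def flatPts (l : List ((Int × Int) × (Int × Int))) : List (Int × Int) :=
  l.flatMap (fun p => [p.1, p.2])

-- A's dict after processing a flat prefix F: exactly first-seen index of each seen point
def InvA (d : PySem.Dict (Int × Int) Int) (F : List (Int × Int)) : Prop :=
  ∀ k, d.get? k = if k ∈ distincts F then some ((distincts F).idxOf k : Int) else none

lemma idxOf_append_of_mem (a : Int × Int) (l t : List (Int × Int)) (h : a ∈ l) :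
    (l ++ t).idxOf a = l.idxOf a := by
  induction l with
  | nil => cases h
  | cons x xs ih =>
    by_cases hx : x = a
    · simp [hx]
    · have : a ∈ xs := by cases List.mem_cons.1 h with
        | inl h' => exact absurd h'.symm hx
        | inr h' => exact h'
      simp [hx, ih this]

lemma idxOf_append_singleton_self (a : Int × Int) (l : List (Int × Int)) (h : a ∉ l) :
    (l ++ [a]).idxOf a = l.length := by
  induction l with
  | nil => simp
  | cons x xs ih =>
    have hx : ¬ x = a := fun he => h (by simp [he])
    simp [hx, ih (fun hm => h (by simp [hm]))]

lemma distincts_append_singleton (F : List (Int × Int)) (x : Int × Int) :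
    distincts (F ++ [x]) = if x ∈ distincts F then distincts F else distincts F ++ [x] := by
  unfold distincts
  rw [PySem.Set.ofList_append_singleton]
  unfold PySem.Set.add
  by_cases h : x ∈ PySem.Set.ofList F
  · simp [PySem.Set.contains, h]
  · simp [PySem.Set.contains, h]

lemma InvA_contains (d : PySem.Dict (Int × Int) Int) (F : List (Int × Int)) (h : InvA d F)
    (k : Int × Int) : d.contains k = true ↔ k ∈ distincts F := by
  rw [PySem.Dict.contains_eq_isSome_get?, h k]
  by_cases hk : k ∈ distincts F <;> simp [hk]

-- one "if new then insert at running index" step of A, as a function on (dict, index)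
def stepA (st : PySem.Dict (Int × Int) Int × Int) (x : Int × Int) :
    PySem.Dict (Int × Int) Int × Int :=
  if st.1.contains x = false then (st.1.insert x st.2, st.2 + 1) else st

lemma stepA_spec (d : PySem.Dict (Int × Int) Int) (F : List (Int × Int)) (x : Int × Int)
    (h : InvA d F) :
    InvA (stepA (d, ((distincts F).length : Int)) x).1 (F ++ [x]) ∧
      (stepA (d, ((distincts F).length : Int)) x).2 = ((distincts (F ++ [x])).length : Int) := by
  unfold stepA
  by_cases hx : x ∈ distincts F
  · have hc : d.contains x = true := (InvA_contains d F h x).2 hx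
    rw [if_neg (by simp [hc])]
    refine ⟨fun k => ?_, by simp [distincts_append_singleton, hx]⟩
    rw [distincts_append_singleton, if_pos hx]
    exact h k
  · have hc : d.contains x = false := by
      cases hcc : d.contains x with
      | false => rfl
      | true => exact absurd ((InvA_contains d F h x).1 hcc) hx
    rw [if_pos hc]
    refine ⟨fun k => ?_, by simp [distincts_append_singleton, hx]⟩
    rw [distincts_append_singleton, if_neg hx]
    show (d.insert x ((distincts F).length : Int)).get? k = _
    rw [PySem.Dict.get?_insert]
    by_cases hk : x = k
    · subst hk
      simp [hx, idxOf_append_singleton_self x _ hx]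
    · have hkx : ¬ k = x := fun he => hk he.symm
      rw [if_neg hkx]
      rw [h k]
      by_cases hkF : k ∈ distincts F
      · simp [hkF, List.mem_append, idxOf_append_of_mem k _ _ hkF]
      · have : ¬ k ∈ distincts F ++ [x] := by
          simp [List.mem_append, hkF, hkx]
        simp [hkF, this]

-- the pair list mapped through first-seen indices of growing flat prefixes
def rankList (F : List (Int × Int)) : List ((Int × Int) × (Int × Int)) → List (Int × Int)
  | [] => []
  | p :: rest =>
    (((distincts (F ++ [p.1, p.2])).idxOf p.1 : Int),
     ((distincts (F ++ [p.1, p.2])).idxOf p.2 : Int)) :: rankList (F ++ [p.1, p.2]) rest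

lemma goA_cons (d : PySem.Dict (Int × Int) Int) (idx : Int) (s e : Int × Int)
    (rest : List ((Int × Int) × (Int × Int))) :
    goA d idx ((s, e) :: rest) =
      ((stepA (stepA (d, idx) s) e).1.getD s 0, (stepA (stepA (d, idx) s) e).1.getD e 0)
        :: goA (stepA (stepA (d, idx) s) e).1 (stepA (stepA (d, idx) s) e).2 rest := rfl

lemma goA_eq_rankList (rest : List ((Int × Int) × (Int × Int))) (F : List (Int × Int))
    (d : PySem.Dict (Int × Int) Int) (h : InvA d F) :
    goA d ((distincts F).length : Int) rest = rankList F rest := by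
  induction rest generalizing F d with
  | nil => rfl
  | cons p rest ih =>
    obtain ⟨s, e⟩ := p
    have h1 := stepA_spec d F s h
    have hst1 : stepA (d, ((distincts F).length : Int)) s
        = ((stepA (d, ((distincts F).length : Int)) s).1, ((distincts (F ++ [s])).length : Int)) := by
      rw [← h1.2]
    have h2 := stepA_spec (stepA (d, ((distincts F).length : Int)) s).1 (F ++ [s]) e h1.1
    have hFse : F ++ [s] ++ [e] = F ++ [s, e] := by simp
    rw [hFse] at h2
    rw [goA_cons, hst1]
    have hst2 : stepA ((stepA (d, ((distincts F).length : Int)) s).1,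
          ((distincts (F ++ [s])).length : Int)) e
        = ((stepA ((stepA (d, ((distincts F).length : Int)) s).1,
              ((distincts (F ++ [s])).length : Int)) e).1,
           ((distincts (F ++ [s, e])).length : Int)) := by
      rw [← h2.2]
    rw [hst2]
    set d2 := (stepA ((stepA (d, ((distincts F).length : Int)) s).1,
        ((distincts (F ++ [s])).length : Int)) e).1 with hd2
    have hsmem : s ∈ distincts (F ++ [s, e]) := by
      unfold distincts; rw [PySem.Set.mem_ofList]; simp
    have hemem : e ∈ distincts (F ++ [s, e]) := by
      unfold distincts; rw [PySem.Set.mem_ofList]; simp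
    have hgs : d2.getD s 0 = ((distincts (F ++ [s, e])).idxOf s : Int) := by
      have := h2.1 s; rw [if_pos hsmem] at this
      exact PySem.Dict.getD_of_get?_eq_some d2 0 this
    have hge : d2.getD e 0 = ((distincts (F ++ [s, e])).idxOf e : Int) := by
      have := h2.1 e; rw [if_pos hemem] at this
      exact PySem.Dict.getD_of_get?_eq_some d2 0 this
    rw [rankList]
    simp only [hgs, hge]
    exact congrArg _ (ih (F ++ [s, e]) d2 h2.1)

lemma idxOf_prefix_eq (F t : List (Int × Int)) (p : Int × Int) (h : p ∈ distincts F) :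
    (distincts (F ++ t)).idxOf p = (distincts F).idxOf p := by
  induction t generalizing F with
  | nil => simp
  | cons x xs ih =>
    have : F ++ x :: xs = (F ++ [x]) ++ xs := by simp
    rw [this, ih (F ++ [x])]
    · rw [distincts_append_singleton]
      by_cases hx : x ∈ distincts F
      · simp [hx]
      · simp [hx, idxOf_append_of_mem p _ _ h]
    · rw [distincts_append_singleton]
      by_cases hx : x ∈ distincts F
      · simpa [hx]
      · simp [hx, List.mem_append, h]

-- B's rank of a point = its position in the distinct-point list, for any point of the stream
lemma first_seen_rank_eq (f : List (Int × Int)) (p : Int × Int) (h : p ∈ f) :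
    first_seen_rank f p = ((distincts f).idxOf p : Int) := by
  obtain ⟨i, hi⟩ := Option.isSome_iff_exists.1 ((PySem.List.index?_isSome_iff f p).2 h)
  obtain ⟨pre, suf, hf, hlen, hnp⟩ := (PySem.List.index?_eq_some_iff f p i).1 hi
  unfold first_seen_rank
  rw [hi]
  show ((PySem.Set.ofList (PySem.List.slice f none (some ((i : Int) + 1)))).length : Int) - 1 = _
  have hslice : PySem.List.slice f none (some ((i : Int) + 1)) = pre ++ [p] := by
    have : ((i : Int) + 1) = ((i + 1 : Nat) : Int) := by push_cast; ring
    rw [this, PySem.List.slice_to_natCast, hf, ← hlen]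
    rw [List.take_append]
    simp
  rw [hslice]
  have hd1 : PySem.Set.ofList (pre ++ [p]) = distincts pre ++ [p] := by
    have := distincts_append_singleton pre p
    unfold distincts at this ⊢
    rw [this, if_neg]
    intro hm
    exact hnp (by simpa [PySem.Set.mem_ofList] using hm)
  have hd2 : (distincts f).idxOf p = (distincts pre).length := by
    have hfp : f = (pre ++ [p]) ++ suf := by simp [hf]
    rw [hfp, idxOf_prefix_eq (pre ++ [p]) suf p]
    · have : distincts (pre ++ [p]) = distincts pre ++ [p] := hd1
      rw [this, idxOf_append_singleton_self]
      intro hm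
      exact hnp (by simpa [distincts, PySem.Set.mem_ofList] using hm)
    · unfold distincts; rw [PySem.Set.mem_ofList]; simp
  rw [hd1, hd2]
  simp

lemma rankList_eq_map (l : List ((Int × Int) × (Int × Int))) (F : List (Int × Int)) :
    rankList F l =
      l.map (fun p => (((distincts (F ++ flatPts l)).idxOf p.1 : Int),
                       ((distincts (F ++ flatPts l)).idxOf p.2 : Int))) := by
  induction l generalizing F with
  | nil => rfl
  | cons p rest ih =>
    obtain ⟨s, e⟩ := p
    rw [rankList, ih (F ++ [s, e])]
    have hflat : F ++ flatPts ((s, e) :: rest) = (F ++ [s, e]) ++ flatPts rest := by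
      unfold flatPts; simp
    rw [List.map_cons]
    congr 1
    · have hs : s ∈ distincts (F ++ [s, e]) := by
        unfold distincts; rw [PySem.Set.mem_ofList]; simp
      have he : e ∈ distincts (F ++ [s, e]) := by
        unfold distincts; rw [PySem.Set.mem_ofList]; simp
      simp only [hflat]
      rw [idxOf_prefix_eq _ _ _ hs, idxOf_prefix_eq _ _ _ he]
    · apply List.map_congr_left
      intro a _
      simp only [hflat]

lemma mem_flatPts_fst (l : List ((Int × Int) × (Int × Int))) (p : (Int × Int) × (Int × Int))
    (h : p ∈ l) : p.1 ∈ flatPts l := by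
  unfold flatPts
  exact List.mem_flatMap.2 ⟨p, h, by simp⟩

lemma mem_flatPts_snd (l : List ((Int × Int) × (Int × Int))) (p : (Int × Int) × (Int × Int))
    (h : p ∈ l) : p.2 ∈ flatPts l := by
  unfold flatPts
  exact List.mem_flatMap.2 ⟨p, h, by simp⟩

-- ===== VERDICT (by name: the statement is the Claim_ definition above) =====
theorem map_coordinates_to_indices_spec : Claim_equal_map_coordinates_to_indices := by
  intro l _
  unfold Spec_map_coordinates_to_indices map_coordinates_to_indices map_coordinates_to_indices_alt
  have hpairs : l.map (fun p => (p.1, p.2)) = l := by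
    simp
  rw [hpairs]
  have hA : InvA PySem.Dict.empty [] := by
    intro k; simp [distincts, PySem.Set.ofList, PySem.Dict.get?_empty]
  have h0 : (0 : Int) = ((distincts ([] : List (Int × Int))).length : Int) := by
    simp [distincts, PySem.Set.ofList]
  rw [h0, goA_eq_rankList l [] PySem.Dict.empty hA, rankList_eq_map l []]
  show _ = l.map (fun p => (first_seen_rank (l.flatMap fun p => [p.1, p.2]) p.1,
                            first_seen_rank (l.flatMap fun p => [p.1, p.2]) p.2))
  apply List.map_congr_left
  intro p hp
  have h1 := first_seen_rank_eq (flatPts l) p.1 (mem_flatPts_fst l p hp)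
  have h2 := first_seen_rank_eq (flatPts l) p.2 (mem_flatPts_snd l p hp)
  unfold flatPts at h1 h2
  rw [h1, h2]
  simp [flatPts]
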